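-- pv_equiv track=rewrite | github.com/webmetic-gmbh/webmetic-utm-referrer-attribution-parser | utm_referrer_parser/parser.py | _infer_from_click_ids
-- ===== SOURCE A (Python) =====
-- from typing import Dict, Optional, Any
--
-- def _infer_from_click_ids(url_params: Dict[str, str]) -> Dict[str, Optional[str]]:
--     """Infer source and medium from click ID parameters."""
--     attribution = {'source': None, 'medium': None}
--
--     # Google Ads click IDs
--     google_click_ids = {'gclid', 'gbraid', 'wbraid', 'gad_source', 'srsltid'}
--     if any(param in url_params for param in google_click_ids):
--         attribution['source'] = 'google'
--         attribution['medium'] = 'cpc'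
--         return attribution
--
--     # Facebook click ID
--     if 'fbclid' in url_params:
--         attribution['source'] = 'facebook'
--         attribution['medium'] = 'cpc'
--         return attribution
--
--     # Microsoft/Bing click ID
--     if 'msclkid' in url_params:
--         attribution['source'] = 'bing'
--         attribution['medium'] = 'cpc'
--         return attribution
--
--     # Twitter click ID
--     if 'twclid' in url_params or 'ttclid' in url_params:
--         attribution['source'] = 'twitter'
--         attribution['medium'] = 'cpc'
--         return attribution
--
--     # LinkedIn click ID
--     if 'li_fat_id' in url_params:
--         attribution['source'] = 'linkedin'
--         attribution['medium'] = 'cpc'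
--         return attribution
--
--     # TikTok click ID
--     if 'ttclid' in url_params:
--         attribution['source'] = 'tiktok'
--         attribution['medium'] = 'cpc'
--         return attribution
--
--     # Instagram share ID
--     if 'igshid' in url_params:
--         attribution['source'] = 'instagram'
--         attribution['medium'] = 'social'
--         return attribution
--
--     # Snapchat click ID
--     if 'sccid' in url_params:
--         attribution['source'] = 'snapchat'
--         attribution['medium'] = 'cpc'
--         return attribution
--
--     # Email marketing platforms
--     if 'mc_cid' in url_params or 'mc_eid' in url_params:
--         attribution['source'] = 'mailchimp'
--         attribution['medium'] = 'email'
--         return attribution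
--
--     if 'ml_subscriber_hash' in url_params:
--         attribution['source'] = 'mailerlite'
--         attribution['medium'] = 'email'
--         return attribution
--
--     # Other platforms
--     if 'dclid' in url_params:
--         attribution['source'] = 'doubleclick'
--         attribution['medium'] = 'display'
--         return attribution
--
--     if 'yclid' in url_params:
--         attribution['source'] = 'yahoo'
--         attribution['medium'] = 'cpc'
--         return attribution
--
--     if 'epik' in url_params:
--         attribution['source'] = 'pinterest'
--         attribution['medium'] = 'social'
--         return attribution
--
--     if 'rdt_cid' in url_params:
--         attribution['source'] = 'reddit'
--         attribution['medium'] = 'cpc'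
--         return attribution
--
--     return attribution
-- ===== SOURCE B (Python) =====
-- from typing import Dict, Optional
--
-- # Inverted index: click-id param -> priority rank (lower wins, matching A's chain order).
-- # 'ttclid' -> 3 (twitter): A's later tiktok branch is unreachable.
-- _RANK = {
--     'gclid': 0, 'gbraid': 0, 'wbraid': 0, 'gad_source': 0, 'srsltid': 0,
--     'fbclid': 1, 'msclkid': 2, 'twclid': 3, 'ttclid': 3, 'li_fat_id': 4,
--     'igshid': 5, 'sccid': 6, 'mc_cid': 7, 'mc_eid': 7, 'ml_subscriber_hash': 8,
--     'dclid': 9, 'yclid': 10, 'epik': 11, 'rdt_cid': 12,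
-- }
--
-- _ATTR = [
--     ('google', 'cpc'), ('facebook', 'cpc'), ('bing', 'cpc'), ('twitter', 'cpc'),
--     ('linkedin', 'cpc'), ('instagram', 'social'), ('snapchat', 'cpc'),
--     ('mailchimp', 'email'), ('mailerlite', 'email'), ('doubleclick', 'display'),
--     ('yahoo', 'cpc'), ('pinterest', 'social'), ('reddit', 'cpc'),
-- ]
--
-- def _infer_from_click_ids(url_params: Dict[str, str]) -> Dict[str, Optional[str]]:
--     """Infer source and medium: one pass over the keys, keep the best-ranked click id."""
--     best = 13
--     for key in url_params:
--         best = min(best, _RANK.get(key, 13))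
--     if best == 13:
--         return {'source': None, 'medium': None}
--     source, medium = _ATTR[best]
--     return {'source': source, 'medium': medium}
-- ===== Notes on version B (the rewrite author's own statement) =====
-- stated objective: alternative
-- what changed: Inverted the traversal: instead of testing each rule's params against the dict in a fixed if-chain, B makes one pass over the url_params keys with an inverted index param->priority rank, keeps the minimum rank, and maps that rank to (source, medium) at the end.
import Mathlib
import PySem

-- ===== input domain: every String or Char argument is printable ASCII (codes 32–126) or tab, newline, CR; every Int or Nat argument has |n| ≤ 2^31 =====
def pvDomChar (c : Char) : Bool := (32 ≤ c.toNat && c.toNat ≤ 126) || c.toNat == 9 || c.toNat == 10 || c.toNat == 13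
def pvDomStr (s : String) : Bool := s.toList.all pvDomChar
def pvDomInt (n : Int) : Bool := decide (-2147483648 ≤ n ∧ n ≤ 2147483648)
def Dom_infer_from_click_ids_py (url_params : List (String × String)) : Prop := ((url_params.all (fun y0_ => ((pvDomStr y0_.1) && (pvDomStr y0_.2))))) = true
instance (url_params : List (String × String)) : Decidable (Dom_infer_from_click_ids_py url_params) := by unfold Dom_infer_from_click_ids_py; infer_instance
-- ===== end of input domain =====

-- B inverts the traversal: one pass over the url_params keys with an inverted index param -> priority rank, keeping the minimum rank (objective: alternative decomposition).

-- ===== PORT A =====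
def infer_from_click_ids_py (url_params : List (String × String)) : List (String × Option String) :=
  let d := PySem.Dict.mk url_params
  let google_click_ids : PySem.Set String :=
    PySem.Set.ofList ["gclid", "gbraid", "wbraid", "gad_source", "srsltid"]
  if google_click_ids.any (fun p => d.contains p) then
    [("source", some "google"), ("medium", some "cpc")]
  else if d.contains "fbclid" then [("source", some "facebook"), ("medium", some "cpc")]
  else if d.contains "msclkid" then [("source", some "bing"), ("medium", some "cpc")]
  else if d.contains "twclid" || d.contains "ttclid" then [("source", some "twitter"), ("medium", some "cpc")]
  else if d.contains "li_fat_id" then [("source", some "linkedin"), ("medium", some "cpc")]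
  else if d.contains "ttclid" then [("source", some "tiktok"), ("medium", some "cpc")]
  else if d.contains "igshid" then [("source", some "instagram"), ("medium", some "social")]
  else if d.contains "sccid" then [("source", some "snapchat"), ("medium", some "cpc")]
  else if d.contains "mc_cid" || d.contains "mc_eid" then [("source", some "mailchimp"), ("medium", some "email")]
  else if d.contains "ml_subscriber_hash" then [("source", some "mailerlite"), ("medium", some "email")]
  else if d.contains "dclid" then [("source", some "doubleclick"), ("medium", some "display")]
  else if d.contains "yclid" then [("source", some "yahoo"), ("medium", some "cpc")]
  else if d.contains "epik" then [("source", some "pinterest"), ("medium", some "social")]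
  else if d.contains "rdt_cid" then [("source", some "reddit"), ("medium", some "cpc")]
  else [("source", none), ("medium", none)]

-- ===== PORT B =====
-- inverted index: click-id param -> priority rank (lower wins; 'ttclid' -> 3, twitter: A's tiktok branch is unreachable)
def pvRankDict : PySem.Dict String Nat :=
  PySem.Dict.mk
    [("gclid", 0), ("gbraid", 0), ("wbraid", 0), ("gad_source", 0), ("srsltid", 0),
     ("fbclid", 1), ("msclkid", 2), ("twclid", 3), ("ttclid", 3), ("li_fat_id", 4),
     ("igshid", 5), ("sccid", 6), ("mc_cid", 7), ("mc_eid", 7), ("ml_subscriber_hash", 8),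
     ("dclid", 9), ("yclid", 10), ("epik", 11), ("rdt_cid", 12)]

def pvAttr : List (String × String) :=
  [("google", "cpc"), ("facebook", "cpc"), ("bing", "cpc"), ("twitter", "cpc"),
   ("linkedin", "cpc"), ("instagram", "social"), ("snapchat", "cpc"),
   ("mailchimp", "email"), ("mailerlite", "email"), ("doubleclick", "display"),
   ("yahoo", "cpc"), ("pinterest", "social"), ("reddit", "cpc")]

def infer_from_click_ids_py_alt (url_params : List (String × String)) : List (String × Option String) :=
  let d := PySem.Dict.mk url_params
  let best := d.keys.foldl (fun b k => min b (pvRankDict.getD k 13)) 13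
  if best == 13 then [("source", none), ("medium", none)]
  else
    -- _ATTR[best]: best ≤ 12 here, so the IndexError branch of pyGet? is unreachable
    match PySem.List.pyGet? pvAttr (best : Int) with
    | some sm => [("source", some sm.1), ("medium", some sm.2)]
    | none => [("source", none), ("medium", none)]

-- ===== PRECONDITION & SPEC =====
def Spec_infer_from_click_ids_py (url_params : List (String × String)) (out : List (String × Option String)) : Prop := out = infer_from_click_ids_py_alt url_params
instance (url_params : List (String × String)) (out : List (String × Option String)) : Decidable (Spec_infer_from_click_ids_py url_params out) := by unfold Spec_infer_from_click_ids_py; infer_instance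

-- ===== CLAIM =====
def Claim_equal_infer_from_click_ids_py : Prop := ∀ (url_params : List (String × String)), Dom_infer_from_click_ids_py url_params → Spec_infer_from_click_ids_py url_params (infer_from_click_ids_py url_params)

-- ===== LEMMAS AND PROOFS =====

-- the rank lookup B performs per key
def pvRank (k : String) : Nat := pvRankDict.getD k 13

-- A's branch conditions, indexed by rank
def pvCondA (d : PySem.Dict String String) : Nat → Bool
  | 0 => d.contains "gclid" || (d.contains "gbraid" || (d.contains "wbraid" || (d.contains "gad_source" || d.contains "srsltid")))
  | 1 => d.contains "fbclid"
  | 2 => d.contains "msclkid"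
  | 3 => d.contains "twclid" || d.contains "ttclid"
  | 4 => d.contains "li_fat_id"
  | 5 => d.contains "igshid"
  | 6 => d.contains "sccid"
  | 7 => d.contains "mc_cid" || d.contains "mc_eid"
  | 8 => d.contains "ml_subscriber_hash"
  | 9 => d.contains "dclid"
  | 10 => d.contains "yclid"
  | 11 => d.contains "epik"
  | 12 => d.contains "rdt_cid"
  | _ => false

def pvOut : Nat → List (String × Option String)
  | 0 => [("source", some "google"), ("medium", some "cpc")]
  | 1 => [("source", some "facebook"), ("medium", some "cpc")]
  | 2 => [("source", some "bing"), ("medium", some "cpc")]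
  | 3 => [("source", some "twitter"), ("medium", some "cpc")]
  | 4 => [("source", some "linkedin"), ("medium", some "cpc")]
  | 5 => [("source", some "instagram"), ("medium", some "social")]
  | 6 => [("source", some "snapchat"), ("medium", some "cpc")]
  | 7 => [("source", some "mailchimp"), ("medium", some "email")]
  | 8 => [("source", some "mailerlite"), ("medium", some "email")]
  | 9 => [("source", some "doubleclick"), ("medium", some "display")]
  | 10 => [("source", some "yahoo"), ("medium", some "cpc")]
  | 11 => [("source", some "pinterest"), ("medium", some "social")]
  | 12 => [("source", some "reddit"), ("medium", some "cpc")]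
  | _ => [("source", none), ("medium", none)]

-- A as a chain over pvCondA (the tiktok branch kept verbatim)
def pvChain (d : PySem.Dict String String) : List (String × Option String) :=
  if pvCondA d 0 then pvOut 0
  else if pvCondA d 1 then pvOut 1
  else if pvCondA d 2 then pvOut 2
  else if pvCondA d 3 then pvOut 3
  else if pvCondA d 4 then pvOut 4
  else if d.contains "ttclid" then [("source", some "tiktok"), ("medium", some "cpc")]
  else if pvCondA d 5 then pvOut 5
  else if pvCondA d 6 then pvOut 6
  else if pvCondA d 7 then pvOut 7
  else if pvCondA d 8 then pvOut 8
  else if pvCondA d 9 then pvOut 9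
  else if pvCondA d 10 then pvOut 10
  else if pvCondA d 11 then pvOut 11
  else if pvCondA d 12 then pvOut 12
  else pvOut 13

-- B's tail, as a function of the computed minimum rank
def pvAttrOut (b : Nat) : List (String × Option String) :=
  if b == 13 then [("source", none), ("medium", none)]
  else
    match PySem.List.pyGet? pvAttr (b : Int) with
    | some sm => [("source", some sm.1), ("medium", some sm.2)]
    | none => [("source", none), ("medium", none)]

theorem pvA_eq_chain (up : List (String × String)) :
    infer_from_click_ids_py up = pvChain (PySem.Dict.mk up) := by
  have hg : (PySem.Set.ofList ["gclid", "gbraid", "wbraid", "gad_source", "srsltid"] : PySem.Set String)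
      = ["gclid", "gbraid", "wbraid", "gad_source", "srsltid"] := by decide
  simp only [infer_from_click_ids_py, pvChain, pvCondA, pvOut, hg,
    List.any_cons, List.any_nil, Bool.or_false]

theorem pvB_eq_attrOut (up : List (String × String)) :
    infer_from_click_ids_py_alt up =
      pvAttrOut ((PySem.Dict.mk up).keys.foldl (fun b k => min b (pvRank k)) 13) := rfl

-- fold facts
theorem pvFold_le_acc (L : List String) (acc : Nat) :
    L.foldl (fun b k => min b (pvRank k)) acc ≤ acc := by
  induction L generalizing acc with
  | nil => simp
  | cons k L ih =>
    simp only [List.foldl_cons]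
    exact le_trans (ih _) (Nat.min_le_left _ _)

theorem pvFold_lb (L : List String) (k : String) :
    ∀ acc, k ∈ L → L.foldl (fun b k => min b (pvRank k)) acc ≤ pvRank k := by
  induction L with
  | nil => intro acc h; cases h
  | cons k' L ih =>
    intro acc hk
    simp only [List.foldl_cons]
    rcases List.mem_cons.mp hk with h | h
    · subst h; exact le_trans (pvFold_le_acc _ _) (Nat.min_le_right _ _)
    · exact ih _ h

theorem pvFold_attain (L : List String) (acc : Nat) :
    L.foldl (fun b k => min b (pvRank k)) acc = acc ∨
      ∃ k ∈ L, L.foldl (fun b k => min b (pvRank k)) acc = pvRank k := by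
  induction L generalizing acc with
  | nil => exact Or.inl rfl
  | cons k' L ih =>
    simp only [List.foldl_cons]
    rcases ih (min acc (pvRank k')) with h | ⟨k, hk, h⟩
    · rcases le_or_gt acc (pvRank k') with hle | hlt
      · exact Or.inl (by rw [h, Nat.min_eq_left hle])
      · exact Or.inr ⟨k', by simp, by rw [h, Nat.min_eq_right (le_of_lt hlt)]⟩
    · exact Or.inr ⟨k, List.mem_cons_of_mem _ hk, h⟩

-- every key has either rank 13 (unknown) or is one of the indexed click ids
theorem pvRank_cases (k : String) :
    pvRank k = 13 ∨ k ∈ ["gclid", "gbraid", "wbraid", "gad_source", "srsltid",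
      "fbclid", "msclkid", "twclid", "ttclid", "li_fat_id", "igshid", "sccid",
      "mc_cid", "mc_eid", "ml_subscriber_hash", "dclid", "yclid", "epik", "rdt_cid"] := by
  by_cases hk : k ∈ pvRankDict.keys
  · right
    have hkeys : pvRankDict.keys = ["gclid", "gbraid", "wbraid", "gad_source", "srsltid",
      "fbclid", "msclkid", "twclid", "ttclid", "li_fat_id", "igshid", "sccid",
      "mc_cid", "mc_eid", "ml_subscriber_hash", "dclid", "yclid", "epik", "rdt_cid"] := by decide
    rwa [hkeys] at hk
  · left
    have hc : pvRankDict.contains k = false := by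
      rw [PySem.Dict.contains_eq_decide_mem_keys]
      simp [hk]
    unfold pvRank
    exact PySem.Dict.getD_of_not_contains pvRankDict 13 hc

-- rank of a member key makes A's corresponding condition true
theorem pvCond_of_rank (d : PySem.Dict String String) (k : String)
    (hmem : k ∈ d.keys) (hne : pvRank k ≠ 13) : pvCondA d (pvRank k) = true := by
  have hc : d.contains k = true := (PySem.Dict.contains_iff_mem_keys d k).mpr hmem
  rcases pvRank_cases k with h | h
  · exact absurd h hne
  · simp only [List.mem_cons, List.not_mem_nil, or_false] at h
    rcases h with rfl | rfl | rfl | rfl | rfl | rfl | rfl | rfl | rfl | rfl | rfl | rfl | rfl | rfl | rfl | rfl | rfl | rfl | rfl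
    · rw [(by decide : pvRank "gclid" = 0)]; simp [pvCondA, hc]
    · rw [(by decide : pvRank "gbraid" = 0)]; simp [pvCondA, hc]
    · rw [(by decide : pvRank "wbraid" = 0)]; simp [pvCondA, hc]
    · rw [(by decide : pvRank "gad_source" = 0)]; simp [pvCondA, hc]
    · rw [(by decide : pvRank "srsltid" = 0)]; simp [pvCondA, hc]
    · rw [(by decide : pvRank "fbclid" = 1)]; simp [pvCondA, hc]
    · rw [(by decide : pvRank "msclkid" = 2)]; simp [pvCondA, hc]
    · rw [(by decide : pvRank "twclid" = 3)]; simp [pvCondA, hc]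
    · rw [(by decide : pvRank "ttclid" = 3)]; simp [pvCondA, hc]
    · rw [(by decide : pvRank "li_fat_id" = 4)]; simp [pvCondA, hc]
    · rw [(by decide : pvRank "igshid" = 5)]; simp [pvCondA, hc]
    · rw [(by decide : pvRank "sccid" = 6)]; simp [pvCondA, hc]
    · rw [(by decide : pvRank "mc_cid" = 7)]; simp [pvCondA, hc]
    · rw [(by decide : pvRank "mc_eid" = 7)]; simp [pvCondA, hc]
    · rw [(by decide : pvRank "ml_subscriber_hash" = 8)]; simp [pvCondA, hc]
    · rw [(by decide : pvRank "dclid" = 9)]; simp [pvCondA, hc]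
    · rw [(by decide : pvRank "yclid" = 10)]; simp [pvCondA, hc]
    · rw [(by decide : pvRank "epik" = 11)]; simp [pvCondA, hc]
    · rw [(by decide : pvRank "rdt_cid" = 12)]; simp [pvCondA, hc]

-- a true condition exhibits a member key of that rank
theorem pvRank_of_cond (d : PySem.Dict String String) (r : Nat) (hr : r ≤ 12)
    (h : pvCondA d r = true) : ∃ k ∈ d.keys, pvRank k = r := by
  interval_cases r <;> simp only [pvCondA, Bool.or_eq_true] at h
  · rcases h with h | h | h | h | h
    · exact ⟨"gclid", (PySem.Dict.contains_iff_mem_keys d _).mp h, by decide⟩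
    · exact ⟨"gbraid", (PySem.Dict.contains_iff_mem_keys d _).mp h, by decide⟩
    · exact ⟨"wbraid", (PySem.Dict.contains_iff_mem_keys d _).mp h, by decide⟩
    · exact ⟨"gad_source", (PySem.Dict.contains_iff_mem_keys d _).mp h, by decide⟩
    · exact ⟨"srsltid", (PySem.Dict.contains_iff_mem_keys d _).mp h, by decide⟩
  · exact ⟨"fbclid", (PySem.Dict.contains_iff_mem_keys d _).mp h, by decide⟩
  · exact ⟨"msclkid", (PySem.Dict.contains_iff_mem_keys d _).mp h, by decide⟩
  · rcases h with h | h
    · exact ⟨"twclid", (PySem.Dict.contains_iff_mem_keys d _).mp h, by decide⟩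
    · exact ⟨"ttclid", (PySem.Dict.contains_iff_mem_keys d _).mp h, by decide⟩
  · exact ⟨"li_fat_id", (PySem.Dict.contains_iff_mem_keys d _).mp h, by decide⟩
  · exact ⟨"igshid", (PySem.Dict.contains_iff_mem_keys d _).mp h, by decide⟩
  · exact ⟨"sccid", (PySem.Dict.contains_iff_mem_keys d _).mp h, by decide⟩
  · rcases h with h | h
    · exact ⟨"mc_cid", (PySem.Dict.contains_iff_mem_keys d _).mp h, by decide⟩
    · exact ⟨"mc_eid", (PySem.Dict.contains_iff_mem_keys d _).mp h, by decide⟩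
  · exact ⟨"ml_subscriber_hash", (PySem.Dict.contains_iff_mem_keys d _).mp h, by decide⟩
  · exact ⟨"dclid", (PySem.Dict.contains_iff_mem_keys d _).mp h, by decide⟩
  · exact ⟨"yclid", (PySem.Dict.contains_iff_mem_keys d _).mp h, by decide⟩
  · exact ⟨"epik", (PySem.Dict.contains_iff_mem_keys d _).mp h, by decide⟩
  · exact ⟨"rdt_cid", (PySem.Dict.contains_iff_mem_keys d _).mp h, by decide⟩

theorem pvChain_eval (d : PySem.Dict String String) (b : Nat) (hb : b ≤ 13)
    (hlt : ∀ r, r < b → pvCondA d r = false)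
    (hcur : b = 13 ∨ pvCondA d b = true) :
    pvChain d = pvAttrOut b := by
  have httk : 3 < b → d.contains "ttclid" = false := by
    intro h3
    have := hlt 3 h3
    simp only [pvCondA, Bool.or_eq_false_iff] at this
    exact this.2
  interval_cases b <;>
    simp_all [pvChain, pvAttrOut, pvOut, PySem.List.pyGet?, PySem.List.pyIdx?, pvAttr]

-- ===== VERDICT =====
theorem infer_from_click_ids_py_spec : Claim_equal_infer_from_click_ids_py := by
  intro up _
  unfold Spec_infer_from_click_ids_py
  rw [pvA_eq_chain, pvB_eq_attrOut]
  set d := PySem.Dict.mk up with hd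
  set b := d.keys.foldl (fun b k => min b (pvRank k)) 13 with hbdef
  have hb13 : b ≤ 13 := pvFold_le_acc _ _
  have hlt : ∀ r, r < b → pvCondA d r = false := by
    intro r hr
    by_contra hne
    have htrue : pvCondA d r = true := by
      cases h : pvCondA d r with
      | true => rfl
      | false => exact absurd h hne
    obtain ⟨k, hk, hrk⟩ := pvRank_of_cond d r (by omega) htrue
    have := pvFold_lb d.keys k 13 hk
    omega
  have hcur : b = 13 ∨ pvCondA d b = true := by
    rcases pvFold_attain d.keys 13 with h | ⟨k, hk, h⟩
    · exact Or.inl h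
    · by_cases hb : b = 13
      · exact Or.inl hb
      · refine Or.inr ?_
        have := pvCond_of_rank d k hk (by rw [← h]; exact hb)
        rwa [← h] at this
  exact pvChain_eval d b hb13 hlt hcur
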